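-- pv_equiv track=rewrite | github.com/bohao-li/assignment1-basics | cs336_basics/bpe_tokenizer_trainer.py | _merge_pair_in_sequence
-- ===== SOURCE A (Python) =====
-- from typing import Dict, Tuple, Set, BinaryIO
--
-- def _merge_pair_in_sequence(
--
--     sequence: Tuple[int, ...],
--     bigram_to_merge: Tuple[int, int],
--     new_token_id: int,
-- ) -> Tuple[int, ...]:
--     """
--     Replaces all occurrences of bigram_to_merge in a single sequence with new_token_id.
--     """
--     b1, b2 = bigram_to_merge
--     new_sequence = []
--     i = 0
--     while i < len(sequence):
--         if i + 1 < len(sequence) and sequence[i] == b1 and sequence[i + 1] == b2: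
--             new_sequence.append(new_token_id)
--             i += 2
--         else:
--             new_sequence.append(sequence[i])
--             i += 1
--     return tuple(new_sequence)
-- ===== SOURCE B (Python) =====
-- def _merge_pair_in_sequence(sequence, bigram_to_merge, new_token_id):
--     """Element-driven single pass with a one-element buffer instead of an index loop."""
--     b1, b2 = bigram_to_merge
--     out = []
--     have_prev = False
--     prev = 0
--     for x in sequence:
--         if have_prev and prev == b1 and x == b2:
--             out.append(new_token_id)
--             have_prev = False
--         elif have_prev:
--             out.append(prev)
--             prev = x
--         else:
--             have_prev = True
--             prev = x
--     if have_prev: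
--         out.append(prev)
--     return tuple(out)
-- ===== Notes on version B (the rewrite author's own statement) =====
-- stated objective: faster
-- what changed: Replaced the index-based while loop with lookahead and a +=2 skip by a for-each single pass that carries a one-element pending buffer (match flushes the buffer as new_token_id, otherwise the buffer is emitted and refilled, final flush after the loop), avoiding per-step indexing and len() calls.
import Mathlib
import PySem

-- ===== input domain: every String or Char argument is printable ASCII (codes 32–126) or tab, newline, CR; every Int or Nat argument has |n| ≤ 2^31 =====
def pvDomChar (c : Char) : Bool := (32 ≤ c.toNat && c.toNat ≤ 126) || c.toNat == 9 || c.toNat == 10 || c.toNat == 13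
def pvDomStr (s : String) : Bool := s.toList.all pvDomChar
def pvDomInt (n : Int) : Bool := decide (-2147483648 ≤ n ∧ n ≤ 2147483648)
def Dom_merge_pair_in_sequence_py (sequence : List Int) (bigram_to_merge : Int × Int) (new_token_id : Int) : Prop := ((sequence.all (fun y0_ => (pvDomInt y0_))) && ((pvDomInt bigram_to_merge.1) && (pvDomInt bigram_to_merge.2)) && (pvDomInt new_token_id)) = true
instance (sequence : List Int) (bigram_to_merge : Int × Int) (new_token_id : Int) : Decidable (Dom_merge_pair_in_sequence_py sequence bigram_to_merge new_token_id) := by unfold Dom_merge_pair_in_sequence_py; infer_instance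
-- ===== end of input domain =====

-- B replaces A's index-based while loop (lookahead + skip-by-2) with a for-each
-- single pass carrying a one-element pending buffer; same O(n) cost, different decomposition.


-- ===== PORT A =====
-- A's while loop: index i, lookahead at i+1, skip by 2 on a match (short-circuit order kept).
def pvAGo (seq : List Int) (b1 b2 nt : Int) (i : Nat) : List Int :=
  if h : i < seq.length then
    if h2 : i + 1 < seq.length then
      if seq[i] = b1 ∧ seq[i + 1] = b2 then
        nt :: pvAGo seq b1 b2 nt (i + 2)
      else
        seq[i] :: pvAGo seq b1 b2 nt (i + 1)
    else
      seq[i] :: pvAGo seq b1 b2 nt (i + 1)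
  else []
termination_by seq.length - i

def merge_pair_in_sequence_py (sequence : List Int) (bigram_to_merge : Int × Int) (new_token_id : Int) : List Int :=
  pvAGo sequence bigram_to_merge.1 bigram_to_merge.2 new_token_id 0

-- ===== PORT B =====
-- B's for-each pass with a one-element pending buffer (none = no pending element),
-- plus the final flush after the loop.
def pvBGo (b1 b2 nt : Int) : List Int → Option Int → List Int
  | [], none => []
  | [], some p => [p]
  | x :: xs, none => pvBGo b1 b2 nt xs (some x)
  | x :: xs, some p =>
      if p = b1 ∧ x = b2 then nt :: pvBGo b1 b2 nt xs none
      else p :: pvBGo b1 b2 nt xs (some x)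

def merge_pair_in_sequence_py_alt (sequence : List Int) (bigram_to_merge : Int × Int) (new_token_id : Int) : List Int :=
  pvBGo bigram_to_merge.1 bigram_to_merge.2 new_token_id sequence none

-- ===== PRECONDITION & SPEC =====
def Spec_merge_pair_in_sequence_py (sequence : List Int) (bigram_to_merge : Int × Int) (new_token_id : Int) (out : List Int) : Prop := out = merge_pair_in_sequence_py_alt sequence bigram_to_merge new_token_id
instance (sequence : List Int) (bigram_to_merge : Int × Int) (new_token_id : Int) (out : List Int) : Decidable (Spec_merge_pair_in_sequence_py sequence bigram_to_merge new_token_id out) := by unfold Spec_merge_pair_in_sequence_py; infer_instance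

-- ===== CLAIM (what is proved, stated in full; the proofs are below) =====
def Claim_equal_merge_pair_in_sequence_py : Prop := ∀ (sequence : List Int) (bigram_to_merge : Int × Int) (new_token_id : Int), Dom_merge_pair_in_sequence_py sequence bigram_to_merge new_token_id → Spec_merge_pair_in_sequence_py sequence bigram_to_merge new_token_id (merge_pair_in_sequence_py sequence bigram_to_merge new_token_id)

-- ===== LEMMAS AND PROOFS =====

-- Reference: structural greedy non-overlapping merge.
def pvMergeRec (b1 b2 nt : Int) : List Int → List Int
  | x :: y :: rest =>
      if x = b1 ∧ y = b2 then nt :: pvMergeRec b1 b2 nt rest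
      else x :: pvMergeRec b1 b2 nt (y :: rest)
  | [x] => [x]
  | [] => []

lemma pvBGo_eq_mergeRec (b1 b2 nt : Int) (xs : List Int) :
    pvBGo b1 b2 nt xs none = pvMergeRec b1 b2 nt xs ∧
    ∀ p, pvBGo b1 b2 nt xs (some p) = pvMergeRec b1 b2 nt (p :: xs) := by
  induction xs with
  | nil => exact ⟨rfl, fun p => rfl⟩
  | cons x xs ih =>
      refine ⟨?_, fun p => ?_⟩
      · simp only [pvBGo]
        exact ih.2 x
      · simp only [pvBGo, pvMergeRec]
        split_ifs with h
        · rw [ih.1]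
        · rw [ih.2 x]

lemma pvAGo_eq_mergeRec (b1 b2 nt : Int) (seq : List Int) (i : Nat) :
    pvAGo seq b1 b2 nt i = pvMergeRec b1 b2 nt (seq.drop i) := by
  fun_induction pvAGo seq b1 b2 nt i with
  | case1 i h h2 hm ih =>
      rw [List.drop_eq_getElem_cons h, List.drop_eq_getElem_cons h2]
      simp only [pvMergeRec, if_pos hm, ih]
  | case2 i h h2 hm ih =>
      rw [List.drop_eq_getElem_cons h, List.drop_eq_getElem_cons h2]
      simp only [pvMergeRec, if_neg hm]
      rw [ih, List.drop_eq_getElem_cons h2]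
  | case3 i h h2 ih =>
      have hnil : seq.drop (i + 1) = [] := List.drop_eq_nil_of_le (by omega)
      rw [List.drop_eq_getElem_cons h, hnil]
      rw [hnil] at ih
      simp [pvMergeRec, ih]
  | case4 i h =>
      rw [List.drop_eq_nil_of_le (by omega)]
      rfl

-- ===== VERDICT (by name: the statement is the Claim_ definition above) =====
theorem merge_pair_in_sequence_py_spec : Claim_equal_merge_pair_in_sequence_py := by
  intro sequence bigram nt _
  show merge_pair_in_sequence_py sequence bigram nt = merge_pair_in_sequence_py_alt sequence bigram nt
  unfold merge_pair_in_sequence_py merge_pair_in_sequence_py_alt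
  rw [pvAGo_eq_mergeRec, (pvBGo_eq_mergeRec _ _ _ _).1, List.drop_zero]
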